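-- pv_equiv track=rewrite | github.com/ganeshmohane/Solving-DSA-Problems | Codes/special_fibonacci.py | special_fibonacci
-- ===== SOURCE A (Python) =====
-- def special_fibonacci(n):
--     # Initialize the first Fibonacci value F(1)
--     if n == 1:
--         return 1 % 47
--
--     # Initialize the first two values F(1) and F(2)
--     F1 = 1
--     F2 = 2*2 + 1*1  # This is F(2) = 4 + 1 = 5
--
--     # If n == 2, return F(2) % 47
--     if n == 2:
--         return F2 % 47
--
--     # For n > 2, calculate F(n) iteratively
--     for i in range(3, n + 1):
--         Fn = i * i + (i - 1) * (i - 1)  # F(n) = n*n + (n-1)*(n-1)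
--         F1, F2 = F2, Fn  # Shift F1 to F2, F2 to Fn
--
--     # Return F(n) % 47
--     return F2 % 47
-- ===== SOURCE B (Python) =====
-- def special_fibonacci(n):
--     # Closed form: the loop's last assignment is F2 = n*n + (n-1)*(n-1)
--     return (n * n + (n - 1) * (n - 1)) % 47
-- ===== Notes on version B (the rewrite author's own statement) =====
-- stated objective: faster
-- what changed: Replaces the O(n) loop (which only keeps its final iteration's value) by the closed form (n*n+(n-1)*(n-1)) % 47.
-- outside the precondition, e.g. on special_fibonacci(0): A returns 5, B returns 1; on special_fibonacci(-3): A returns 5, B returns 25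
import Mathlib
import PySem

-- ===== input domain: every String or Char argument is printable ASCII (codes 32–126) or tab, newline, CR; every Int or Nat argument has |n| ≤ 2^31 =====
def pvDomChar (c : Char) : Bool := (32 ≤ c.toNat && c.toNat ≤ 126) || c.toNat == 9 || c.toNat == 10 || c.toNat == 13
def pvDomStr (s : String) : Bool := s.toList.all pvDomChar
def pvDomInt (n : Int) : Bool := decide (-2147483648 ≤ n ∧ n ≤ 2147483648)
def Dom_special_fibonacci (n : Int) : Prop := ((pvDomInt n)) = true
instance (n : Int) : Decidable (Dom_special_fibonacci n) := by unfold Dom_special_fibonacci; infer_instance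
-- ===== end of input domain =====

-- B replaces A's O(n) loop by the closed form (n*n+(n-1)*(n-1)) % 47 (asymptotically faster).


-- ===== PORT A =====
def special_fibonacci (n : Int) : Int :=
  if n == 1 then PySem.Int.mod 1 47
  else
    let F1 : Int := 1
    let F2 : Int := 2 * 2 + 1 * 1
    if n == 2 then PySem.Int.mod F2 47
    else
      let p := (PySem.List.pyRange 3 (n + 1) 1).foldl
        (fun (p : Int × Int) (i : Int) => (p.2, i * i + (i - 1) * (i - 1))) (F1, F2)
      PySem.Int.mod p.2 47

-- ===== PORT B =====
def special_fibonacci_alt (n : Int) : Int :=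
  PySem.Int.mod (n * n + (n - 1) * (n - 1)) 47

-- ===== PRECONDITION & SPEC =====
-- Pre_ restricts to the sequence's natural index domain n ≥ 1 (the sequence positions the
-- function is written for); for n ≤ 0 A's loop never runs and it falls through to the
-- initial value, a corner outside the intended domain.
def Pre_special_fibonacci (n : Int) : Prop := 1 ≤ n
instance (n : Int) : Decidable (Pre_special_fibonacci n) := by unfold Pre_special_fibonacci; infer_instance
def pvWitness_special_fibonacci : Int := 5

def Spec_special_fibonacci (n : Int) (out : Int) : Prop := out = special_fibonacci_alt n
instance (n : Int) (out : Int) : Decidable (Spec_special_fibonacci n out) := by unfold Spec_special_fibonacci; infer_instance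

-- ===== CLAIM (what is proved, stated in full; the proofs are below) =====
def Claim_equal_special_fibonacci : Prop := ∀ (n : Int), Dom_special_fibonacci n → Pre_special_fibonacci n → Spec_special_fibonacci n (special_fibonacci n)

-- ===== LEMMAS AND PROOFS =====

-- After folding A's loop over range(3, n+1), the second component is n*n+(n-1)*(n-1), for n ≥ 2.
theorem special_fib_fold (k : Nat) (a : Int) :
    ((PySem.List.pyRange 3 ((2 + (k : Int)) + 1) 1).foldl
        (fun (p : Int × Int) (i : Int) => (p.2, i * i + (i - 1) * (i - 1))) (a, 5)).2
      = (2 + (k : Int)) * (2 + (k : Int)) + ((2 + (k : Int)) - 1) * ((2 + (k : Int)) - 1) := by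
  cases k with
  | zero =>
    norm_num [PySem.List.pyRange_one_eq_nil (le_refl (3 : Int))]
  | succ m =>
    have h : (2 + ((m + 1 : Nat) : Int)) + 1 = (2 + (m : Int) + 1) + 1 := by push_cast; ring
    rw [h, PySem.List.pyRange_one_succ_right (by omega), List.foldl_append]
    simp
    ring

theorem special_fibonacci_spec : Claim_equal_special_fibonacci := by
  intro n _ hpre
  unfold Spec_special_fibonacci special_fibonacci special_fibonacci_alt
  by_cases h1 : n = 1
  · subst h1; decide
  · by_cases h2 : n = 2
    · subst h2; decide
    · have h3 : 3 ≤ n := by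
        unfold Pre_special_fibonacci at hpre; omega
      obtain ⟨k, hk⟩ : ∃ k : Nat, n = 2 + (k : Int) := ⟨(n - 2).toNat, by omega⟩
      subst hk
      norm_num [h1, h2]
      rw [special_fib_fold k 1]
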